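-- pv_equiv track=rewrite | github.com/JPlimajots/flyfood_2VA | algoritmo genetico tsp.py | organizar_filho
-- ===== SOURCE A (Python) =====
-- def organizar_filho(pai, filho):
--     faltantes = [p for p in pai if p not in filho]
--     duplicados = []
--     visto = set()
--     for i, p in enumerate(filho):
--         if p in visto:
--             duplicados.append(i)
--         else:
--             visto.add(p)
--     for i in duplicados:
--         if faltantes:
--             filho[i] = faltantes.pop()
--     return filho
-- ===== SOURCE B (Python) =====
-- def organizar_filho(pai, filho):
--     faltantes = [p for p in pai if p not in filho]
--     visto = set()
--     out = []
--     for p in filho: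
--         if p in visto and faltantes:
--             out.append(faltantes.pop())
--         else:
--             visto.add(p)
--             out.append(p)
--     filho[:] = out
--     return filho
-- ===== Notes on version B (the rewrite author's own statement) =====
-- stated objective: simpler
-- what changed: Replaces A's two-phase scheme (collect duplicate indices, then a second loop doing indexed in-place writes) with a single pass that rebuilds the child list directly, appending a missing gene whenever the current gene was already seen; no index list and no indexed assignment remain.
import Mathlib
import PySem

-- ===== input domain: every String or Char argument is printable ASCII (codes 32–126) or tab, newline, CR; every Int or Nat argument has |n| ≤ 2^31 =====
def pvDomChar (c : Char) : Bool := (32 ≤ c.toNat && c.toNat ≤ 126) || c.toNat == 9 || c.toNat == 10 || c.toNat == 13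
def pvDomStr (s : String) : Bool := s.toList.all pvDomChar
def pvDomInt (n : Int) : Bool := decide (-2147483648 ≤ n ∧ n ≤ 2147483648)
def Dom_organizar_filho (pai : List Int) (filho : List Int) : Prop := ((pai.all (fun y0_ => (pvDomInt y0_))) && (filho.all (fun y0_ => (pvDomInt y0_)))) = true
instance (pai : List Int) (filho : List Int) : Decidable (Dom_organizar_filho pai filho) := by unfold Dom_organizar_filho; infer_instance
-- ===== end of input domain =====

-- B rebuilds the child in one pass instead of A's two phases (duplicate-index list + indexed writes); objective: simpler.
-- Both Pythons mutate `filho` in place; the equivalence proved here is about the return value (which is that same list).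

-- ===== PORT A =====
-- step of A's first loop: collect indices of duplicates, maintaining the `visto` set
def pvAStep (st : List Int × PySem.Set Int) (pr : Int × Int) : List Int × PySem.Set Int :=
  if PySem.Set.contains st.2 pr.2 then (st.1 ++ [pr.1], st.2) else (st.1, PySem.Set.add st.2 pr.2)

-- step of A's second loop: `if faltantes: filho[i] = faltantes.pop()`
-- (guarded by faltantes ≠ [], `pop()` is getLast! + dropLast, exact; filho[i] = v is pySetD, exact for in-range i)
def pvASet (st : List Int × List Int) (i : Int) : List Int × List Int :=
  if st.2 ≠ [] then (PySem.List.pySetD st.1 i st.2.getLast!, st.2.dropLast) else st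

def organizar_filho (pai : List Int) (filho : List Int) : List Int :=
  let faltantes := pai.filter (fun p => !(filho.contains p))
  let duplicados := ((PySem.List.enumerate filho).foldl pvAStep ([], PySem.Set.empty)).1
  (duplicados.foldl pvASet (filho, faltantes)).1

-- ===== PORT B =====
-- step of B's single loop over filho, state (visto, faltantes, out)
def pvBStep (st : PySem.Set Int × List Int × List Int) (p : Int) : PySem.Set Int × List Int × List Int :=
  if PySem.Set.contains st.1 p ∧ st.2.1 ≠ [] then
    (st.1, st.2.1.dropLast, st.2.2 ++ [st.2.1.getLast!])
  else
    (PySem.Set.add st.1 p, st.2.1, st.2.2 ++ [p])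

def organizar_filho_alt (pai : List Int) (filho : List Int) : List Int :=
  let faltantes := pai.filter (fun p => !(filho.contains p))
  (filho.foldl pvBStep (PySem.Set.empty, faltantes, [])).2.2

-- ===== PRECONDITION & SPEC =====
def Spec_organizar_filho (pai : List Int) (filho : List Int) (out : List Int) : Prop := out = organizar_filho_alt pai filho
instance (pai : List Int) (filho : List Int) (out : List Int) : Decidable (Spec_organizar_filho pai filho out) := by unfold Spec_organizar_filho; infer_instance

-- ===== CLAIM (what is proved, stated in full; the proofs are below) =====
def Claim_equal_organizar_filho : Prop := ∀ (pai : List Int) (filho : List Int), Dom_organizar_filho pai filho → Spec_organizar_filho pai filho (organizar_filho pai filho)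

-- ===== LEMMAS AND PROOFS =====

-- duplicate-index list with absolute Int indices starting at s: a recursive characterisation of A's first loop
def pvDupZ (xs : List Int) (s : Int) (visto : PySem.Set Int) : List Int :=
  match xs with
  | [] => []
  | p :: rest =>
    if PySem.Set.contains visto p then s :: pvDupZ rest (s + 1) visto
    else pvDupZ rest (s + 1) (PySem.Set.add visto p)

-- recursive characterisation of B's loop (returns the out-list only)
def pvBRec (xs : List Int) (visto : PySem.Set Int) (faltantes : List Int) : List Int :=
  match xs with
  | [] => []
  | p :: rest =>
    if PySem.Set.contains visto p ∧ faltantes ≠ [] then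
      faltantes.getLast! :: pvBRec rest visto faltantes.dropLast
    else
      p :: pvBRec rest (PySem.Set.add visto p) faltantes

theorem pvAStep_dup (xs : List Int) : ∀ (s : Int) (acc : List Int) (visto : PySem.Set Int),
    ((PySem.List.enumerate xs s).foldl pvAStep (acc, visto)).1 = acc ++ pvDupZ xs s visto := by
  induction xs with
  | nil => intro s acc visto; simp [PySem.List.enumerate_nil, pvDupZ]
  | cons p rest ih =>
    intro s acc visto
    rw [PySem.List.enumerate_cons]
    simp only [List.foldl_cons, pvAStep, pvDupZ]
    by_cases h : PySem.Set.contains visto p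
    · simp only [h, if_pos]
      rw [ih]
      simp only [List.append_assoc, List.singleton_append]
    · simp only [h, Bool.false_eq_true, if_neg, not_false_iff]
      rw [ih]

theorem pvDupZ_ge (xs : List Int) : ∀ (s : Int) (visto : PySem.Set Int) (i : Int),
    i ∈ pvDupZ xs s visto → s ≤ i := by
  induction xs with
  | nil => intro s visto i hi; simp [pvDupZ] at hi
  | cons p rest ih =>
    intro s visto i hi
    simp only [pvDupZ] at hi
    by_cases h : PySem.Set.contains visto p
    · rw [if_pos h] at hi
      rcases List.mem_cons.mp hi with h1 | h1
      · omega
      · have := ih (s + 1) visto i h1; omega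
    · rw [if_neg h] at hi
      have := ih (s + 1) _ i hi; omega

-- setting only at nonnegative shifted indices skips the head
theorem pvASet_shift (ds : List Int) : ∀ (x : Int) (xs f : List Int),
    (∀ i ∈ ds, 0 ≤ i) →
    ((ds.map (· + 1)).foldl pvASet (x :: xs, f)).1 = x :: (ds.foldl pvASet (xs, f)).1 := by
  induction ds with
  | nil => intro x xs f _; simp
  | cons d ds ih =>
    intro x xs f hds
    have hd : 0 ≤ d := hds d (List.mem_cons_self ..)
    simp only [List.map_cons, List.foldl_cons, pvASet]
    by_cases hf : f ≠ []
    · rw [if_pos hf, if_pos hf]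
      have hset : PySem.List.pySetD (x :: xs) (d + 1) f.getLast! = x :: PySem.List.pySetD xs d f.getLast! := by
        rw [PySem.List.pySetD_of_nonneg _ _ (by omega), PySem.List.pySetD_of_nonneg _ _ hd]
        have : (d + 1).toNat = d.toNat + 1 := by omega
        rw [this]
        rfl
      rw [hset, ih _ _ _ (fun i hi => hds i (List.mem_cons_of_mem _ hi))]
    · rw [if_neg hf, if_neg hf]
      exact ih _ _ _ (fun i hi => hds i (List.mem_cons_of_mem _ hi))

theorem pvDupZ_succ (xs : List Int) : ∀ (s : Int) (visto : PySem.Set Int),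
    pvDupZ xs (s + 1) visto = (pvDupZ xs s visto).map (· + 1) := by
  induction xs with
  | nil => intro s visto; simp [pvDupZ]
  | cons p rest ih =>
    intro s visto
    simp only [pvDupZ]
    by_cases h : PySem.Set.contains visto p
    · simp only [h, if_pos, List.map_cons, ih]
    · simp only [h, Bool.false_eq_true, if_neg, not_false_iff, ih]

-- main invariant: A's second loop over the duplicate indices equals B's rebuild
theorem pvMain (xs : List Int) : ∀ (visto : PySem.Set Int) (f : List Int),
    ((pvDupZ xs 0 visto).foldl pvASet (xs, f)).1 = pvBRec xs visto f := by
  induction xs with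
  | nil => intro visto f; simp [pvDupZ, pvBRec]
  | cons p rest ih =>
    intro visto f
    simp only [pvDupZ, pvBRec]
    have hge : ∀ i ∈ pvDupZ rest 0 visto, (0 : Int) ≤ i := pvDupZ_ge rest 0 visto
    have hge' : ∀ (v : PySem.Set Int) (i : Int), i ∈ pvDupZ rest 0 v → (0 : Int) ≤ i :=
      fun v => pvDupZ_ge rest 0 v
    by_cases h : PySem.Set.contains visto p
    · simp only [h, if_pos]
      rw [show (0 : Int) + 1 = 1 from rfl, show (1 : Int) = 0 + 1 from rfl, pvDupZ_succ]
      by_cases hf : f ≠ []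
      · rw [if_pos ⟨trivial, hf⟩]
        simp only [List.foldl_cons, pvASet]
        rw [if_pos hf]
        have hset : PySem.List.pySetD (p :: rest) (0 : Int) f.getLast! = f.getLast! :: rest := by
          rw [PySem.List.pySetD_of_nonneg _ _ (le_refl 0)]
          rfl
        rw [hset, pvASet_shift _ _ _ _ (hge' visto), ih]
      · have hf0 : f = [] := by by_contra hc; exact hf hc
        subst hf0
        rw [if_neg (by simp)]
        simp only [List.foldl_cons, pvASet]
        rw [if_neg (by simp)]
        have hm : p ∈ visto := (PySem.Set.contains_iff visto p).mp h
        have hadd : PySem.Set.add visto p = visto := by simp [PySem.Set.add, hm]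
        rw [pvASet_shift _ _ _ _ (hge' visto), ih, hadd]
    · simp only [h, Bool.false_eq_true, false_and, if_neg, not_false_iff]
      rw [show (0 : Int) + 1 = 0 + 1 from rfl, pvDupZ_succ,
          pvASet_shift _ _ _ _ (hge' (PySem.Set.add visto p)), ih]

-- B's foldl with out-accumulator equals the recursive characterisation
theorem pvB_fold (xs : List Int) : ∀ (visto : PySem.Set Int) (f out : List Int),
    (xs.foldl pvBStep (visto, f, out)).2.2 = out ++ pvBRec xs visto f := by
  induction xs with
  | nil => intro visto f out; simp [pvBRec]
  | cons p rest ih =>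
    intro visto f out
    simp only [List.foldl_cons, pvBStep, pvBRec]
    by_cases h : PySem.Set.contains visto p ∧ f ≠ []
    · rw [if_pos h, if_pos h, ih]
      rcases h with ⟨_, hf⟩
      simp [List.getLast!_eq_getLast?_getD]
    · rw [if_neg h, if_neg h, ih]
      simp

-- ===== VERDICT (by name: the statement is the Claim_ definition above) =====
theorem organizar_filho_spec : Claim_equal_organizar_filho := by
  intro pai filho _
  unfold Spec_organizar_filho organizar_filho organizar_filho_alt
  rw [pvB_fold, pvAStep_dup filho 0 [] PySem.Set.empty]
  simp only [List.nil_append]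
  exact pvMain filho PySem.Set.empty _
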